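-- pv_equiv track=rewrite | github.com/xiaokaren/Modern-Query-Federation | main.py | hash_join_singlecol
-- ===== SOURCE A (Python) =====
-- def hash_join_singlecol(table1, index1, table2, index2):
--     dict = {}
--
--     # build phase
--     for row1 in table1:
--         value1 = dict.get(row1)
--         if value1 is None:
--             dict[row1] = 1
--         else:
--             dict[row1] = value1 + 1
--
--     result = []
--
--     # probe phase
--     for row2 in table2:
--         value2 = dict.get(row2)
--         if value2 is not None:
--             for x in range(value2):
--                 result.append(row2 + row2)
--
--     return result
-- ===== SOURCE B (Python) =====
-- def hash_join_singlecol(table1, index1, table2, index2):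
--     # direct nested-loop join: one doubled row2 per matching row1, order preserved
--     return [row2 + row2 for row2 in table2 for row1 in table1 if row1 == row2]
-- ===== Notes on version B (the rewrite author's own statement) =====
-- stated objective: simpler
-- what changed: Replaces the two-phase build-a-count-dict-then-probe-and-replicate structure with a single nested-loop comprehension that emits row2+row2 once per equal row1, with no auxiliary index.
import Mathlib
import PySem

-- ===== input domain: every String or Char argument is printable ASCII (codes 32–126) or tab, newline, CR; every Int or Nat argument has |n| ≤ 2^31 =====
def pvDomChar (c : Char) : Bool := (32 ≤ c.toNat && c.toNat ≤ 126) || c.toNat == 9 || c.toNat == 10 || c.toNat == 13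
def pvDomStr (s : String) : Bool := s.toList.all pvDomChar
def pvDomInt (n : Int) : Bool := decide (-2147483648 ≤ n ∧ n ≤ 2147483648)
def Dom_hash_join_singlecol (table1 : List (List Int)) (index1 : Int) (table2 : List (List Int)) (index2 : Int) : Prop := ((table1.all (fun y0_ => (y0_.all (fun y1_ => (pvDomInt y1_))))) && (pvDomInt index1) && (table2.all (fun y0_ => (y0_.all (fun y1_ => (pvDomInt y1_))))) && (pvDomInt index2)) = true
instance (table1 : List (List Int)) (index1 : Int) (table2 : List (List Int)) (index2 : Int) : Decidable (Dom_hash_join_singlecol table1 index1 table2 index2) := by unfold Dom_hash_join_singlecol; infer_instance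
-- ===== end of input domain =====

-- B replaces A's build-a-count-dict-then-probe join with a single nested-loop comprehension (one doubled row2 per equal row1), chosen for simplicity; same output on all inputs.


-- ===== PORT A =====
def hash_join_singlecol (table1 : List (List Int)) (index1 : Int) (table2 : List (List Int)) (index2 : Int) : List (List Int) :=
  -- build phase
  let d : PySem.Dict (List Int) Int := table1.foldl (fun d row1 =>
    match d.get? row1 with
    | none => d.insert row1 1
    | some value1 => d.insert row1 (value1 + 1)) PySem.Dict.empty
  -- probe phase
  table2.foldl (fun result row2 =>
    match d.get? row2 with
    | none => result
    | some value2 => (PySem.List.pyRange 0 value2 1).foldl (fun result _ => result ++ [row2 ++ row2]) result) []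

-- ===== PORT B =====
def hash_join_singlecol_alt (table1 : List (List Int)) (index1 : Int) (table2 : List (List Int)) (index2 : Int) : List (List Int) :=
  table2.flatMap (fun row2 => (table1.filter (fun row1 => row1 == row2)).map (fun _ => row2 ++ row2))

-- ===== PRECONDITION & SPEC =====
def Spec_hash_join_singlecol (table1 : List (List Int)) (index1 : Int) (table2 : List (List Int)) (index2 : Int) (out : List (List Int)) : Prop := out = hash_join_singlecol_alt table1 index1 table2 index2
instance (table1 : List (List Int)) (index1 : Int) (table2 : List (List Int)) (index2 : Int) (out : List (List Int)) : Decidable (Spec_hash_join_singlecol table1 index1 table2 index2 out) := by unfold Spec_hash_join_singlecol; infer_instance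

-- ===== CLAIM (what is proved, stated in full; the proofs are below) =====
def Claim_equal_hash_join_singlecol : Prop := ∀ (table1 : List (List Int)) (index1 : Int) (table2 : List (List Int)) (index2 : Int), Dom_hash_join_singlecol table1 index1 table2 index2 → Spec_hash_join_singlecol table1 index1 table2 index2 (hash_join_singlecol table1 index1 table2 index2)

-- ===== LEMMAS AND PROOFS =====

-- A's build loop is exactly Counter(table1)
theorem build_eq_counter (table1 : List (List Int)) :
    table1.foldl (fun d row1 =>
      match d.get? row1 with
      | none => d.insert row1 1
      | some value1 => d.insert row1 (value1 + 1)) (PySem.Dict.empty : PySem.Dict (List Int) Int)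
    = PySem.Dict.counter table1 := by
  have h : (fun (d : PySem.Dict (List Int) Int) (x : List Int) =>
      match d.get? x with
      | none => d.insert x 1
      | some v => d.insert x (v + 1))
    = fun d x => d.insert x (d.getD x 0 + 1) := by
    funext d x
    cases h : d.get? x <;> simp [PySem.Dict.getD, h]
  rw [h, PySem.Dict.foldl_insert_getD_add_one_eq_counter]

-- appending c once per element of range(v) is replicate
theorem rangefold_eq_replicate (v : Int) (c : List Int) (res : List (List Int)) :
    (PySem.List.pyRange 0 v 1).foldl (fun result _ => result ++ [c]) res
    = res ++ List.replicate v.toNat c := by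
  rw [PySem.List.foldl_append_singleton_eq_map]
  congr 1
  rw [List.map_const', PySem.List.length_pyRange_one]
  simp

-- A's probe step equals B's per-row output, appended
theorem probe_step (table1 : List (List Int)) (row2 : List Int) (res : List (List Int)) :
    (match (PySem.Dict.counter table1).get? row2 with
     | none => res
     | some value2 => (PySem.List.pyRange 0 value2 1).foldl (fun result _ => result ++ [row2 ++ row2]) res)
    = res ++ (table1.filter (fun row1 => row1 == row2)).map (fun _ => row2 ++ row2) := by
  have hfilt : ((table1.filter (fun row1 => row1 == row2)).map
      (fun _ => row2 ++ row2)) = List.replicate (table1.count row2) (row2 ++ row2) := by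
    rw [List.map_const', List.count_eq_length_filter]
  cases h : (PySem.Dict.counter table1).get? row2 with
  | none =>
    have hc : table1.count row2 = 0 := by
      have := PySem.Dict.getD_counter (xs := table1) (v := row2)
      rw [PySem.Dict.getD, h] at this
      simp at this
      omega
    rw [hfilt, hc]
    simp
  | some v =>
    have hv : v = (table1.count row2 : Int) := by
      have := PySem.Dict.getD_counter (xs := table1) (v := row2)
      rw [PySem.Dict.getD, h] at this
      simpa using this
    simp only [hv, rangefold_eq_replicate, hfilt, Int.toNat_natCast]

-- ===== VERDICT (by name: the statement is the Claim_ definition above) =====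
theorem hash_join_singlecol_spec : Claim_equal_hash_join_singlecol := by
  intro table1 index1 table2 index2 _
  unfold Spec_hash_join_singlecol hash_join_singlecol hash_join_singlecol_alt
  rw [build_eq_counter]
  have hstep : (fun (result : List (List Int)) (row2 : List Int) =>
      match (PySem.Dict.counter table1).get? row2 with
      | none => result
      | some value2 => (PySem.List.pyRange 0 value2 1).foldl (fun result _ => result ++ [row2 ++ row2]) result)
    = (fun result row2 => result ++ (table1.filter (fun row1 => row1 == row2)).map (fun _ => row2 ++ row2)) := by
    funext res row2; exact probe_step table1 row2 res
  simp only [hstep]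
  rw [PySem.List.foldl_append_eq_flatMap]
  simp
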